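-- pv_equiv track=rewrite | github.com/idreesaziz/fuck_my_life | src/degradation.py | _needs_doubling
-- ===== SOURCE A (Python) =====
-- def _needs_doubling(base: str) -> bool:
--     """Check if final consonant should double (CVC pattern, monosyllabic)."""
--     if len(base) < 3:
--         return False
--     vowels = set("aeiou")
--     groups = 0
--     in_vowel = False
--     for c in base:
--         if c in vowels:
--             if not in_vowel:
--                 groups += 1
--                 in_vowel = True
--         else:
--             in_vowel = False
--     if groups != 1:
--         return False
--     return (base[-1] not in vowels and base[-1] not in "wxy"
--             and base[-2] in vowels
--             and base[-3] not in vowels)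
-- ===== SOURCE B (Python) =====
-- def _needs_doubling(base: str) -> bool:
--     """Check if final consonant should double (CVC pattern, monosyllabic)."""
--     if len(base) < 3:
--         return False
--     vowels = set("aeiou")
--     # exactly one vowel group  <=>  the vowel positions form one contiguous block
--     positions = [i for i, c in enumerate(base) if c in vowels]
--     if not positions:
--         return False
--     if positions[-1] - positions[0] + 1 != len(positions):
--         return False
--     return (base[-1] not in vowels and base[-1] not in "wxy"
--             and base[-2] in vowels
--             and base[-3] not in vowels)
-- ===== Notes on version B (the rewrite author's own statement) =====
-- stated objective: alternative
-- what changed: Replaces A's stateful in_vowel flag scan that counts vowel-run starts with a position-based formulation: collect the indices of all vowels via enumerate and test monosyllabicity by the arithmetic identity last - first + 1 == count (the vowel positions form one contiguous block); the final CVC triple check is unchanged.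
import Mathlib
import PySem

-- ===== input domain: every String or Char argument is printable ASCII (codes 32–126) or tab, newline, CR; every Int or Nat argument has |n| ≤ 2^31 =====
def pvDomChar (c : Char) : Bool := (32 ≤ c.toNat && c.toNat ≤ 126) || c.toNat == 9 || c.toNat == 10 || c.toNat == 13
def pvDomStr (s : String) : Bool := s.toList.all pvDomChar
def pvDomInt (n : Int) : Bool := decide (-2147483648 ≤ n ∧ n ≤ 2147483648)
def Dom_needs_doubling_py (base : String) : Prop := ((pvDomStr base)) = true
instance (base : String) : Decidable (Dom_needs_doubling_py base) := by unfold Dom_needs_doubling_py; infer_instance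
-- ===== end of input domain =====

-- B replaces A's in_vowel state-machine scan with an index-based test: the vowel
-- positions (from enumerate) must form one contiguous block (last - first + 1 = count).
-- Alternative formulation, same cost.

-- ===== PORT A =====
-- the vowels set, shared literal  (set("aeiou"))
def pvVowels : PySem.Set Char := PySem.Set.ofList "aeiou".toList

-- state machine step over one character: state = (groups, in_vowel)
def pvStepA (st : Int × Bool) (c : Char) : Int × Bool :=
  if pvVowels.contains c then
    (if !st.2 then (st.1 + 1, true) else st)
  else (st.1, false)

def needs_doubling_py (base : String) : Bool :=
  if PySem.Str.len base < 3 then false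
  else
    if (base.toList.foldl pvStepA (0, false)).1 ≠ 1 then false
    else
      match PySem.Str.pyGet? base (-1), PySem.Str.pyGet? base (-2), PySem.Str.pyGet? base (-3) with
      | some c1, some c2, some c3 =>
          -- `c1 not in "wxy"` on a single character is exact as list membership
          !(pvVowels.contains c1) && !("wxy".toList.contains c1)
            && pvVowels.contains c2 && !(pvVowels.contains c3)
      | _, _, _ => false   -- unreachable: len base ≥ 3

-- ===== PORT B =====
-- B's own vowels set literal  (set("aeiou"))
def pvVowelsB : PySem.Set Char := PySem.Set.ofList "aeiou".toList

-- positions = [i for i, c in enumerate(base) if c in vowels]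
def pvPositions (l : List Char) : List Int :=
  ((PySem.List.enumerate l).filter (fun p => pvVowelsB.contains p.2)).map (fun p => p.1)

def needs_doubling_py_alt (base : String) : Bool :=
  if PySem.Str.len base < 3 then false
  else
    let positions := pvPositions base.toList
    if positions.isEmpty then false                 -- `if not positions: return False`
    else
      -- positions[-1] / positions[0] on the guarded-nonempty list: getLastD 0 / headD 0 are exact
      if positions.getLastD 0 - positions.headD 0 + 1 ≠ (positions.length : Int) then false
      else
        match PySem.Str.pyGet? base (-1) with
        | none => false   -- unreachable: len base ≥ 3
        | some c1 =>
          match PySem.Str.pyGet? base (-2) with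
          | none => false
          | some c2 =>
            match PySem.Str.pyGet? base (-3) with
            | none => false
            | some c3 =>
                !(pvVowelsB.contains c1) && !("wxy".toList.contains c1)
                  && pvVowelsB.contains c2 && !(pvVowelsB.contains c3)

-- ===== PRECONDITION & SPEC =====
def Spec_needs_doubling_py (base : String) (out : Bool) : Prop := out = needs_doubling_py_alt base
instance (base : String) (out : Bool) : Decidable (Spec_needs_doubling_py base out) := by unfold Spec_needs_doubling_py; infer_instance

-- ===== CLAIM (what is proved, stated in full; the proofs are below) =====
def Claim_equal_needs_doubling_py : Prop := ∀ (base : String), Dom_needs_doubling_py base → Spec_needs_doubling_py base (needs_doubling_py base)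

-- ===== LEMMAS AND PROOFS =====

-- number of maximal true-runs of a boolean key list (proof-side model of A's counter)
def pvRuns : List Bool → Nat
  | [] => 0
  | b :: t => (if b then 1 else 0) + pvRuns (t.dropWhile (· == b))
termination_by l => l.length
decreasing_by
  simp only [List.length_cons, Nat.lt_succ_iff]
  exact List.length_dropWhile_le _ _

-- indices (from 0) of the true entries (proof-side model of B's positions)
def pvPos : List Bool → List Nat
  | [] => []
  | b :: t => (if b then [0] else []) ++ (pvPos t).map (· + 1)

-- A's step on the boolean key of the character
def pvStepB (st : Int × Bool) (k : Bool) : Int × Bool :=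
  if k then (if !st.2 then (st.1 + 1, true) else st) else (st.1, false)

theorem pvFold_stepB_eq (ks : List Bool) : ∀ (g : Int) (b : Bool),
    (List.foldl pvStepB (g, b) ks).1 = g + (pvRuns (ks.dropWhile (· == b)) : Int) := by
  induction ks with
  | nil => intro g b; simp [pvRuns]
  | cons c t ih =>
    intro g b
    rw [List.foldl_cons]
    cases b <;> cases c <;>
      · simp only [pvStepB, List.dropWhile_cons, ih]
        simp [pvRuns]
        try ring

theorem pvRuns_dropWhile_false (ks : List Bool) :
    pvRuns (ks.dropWhile (· == false)) = pvRuns ks := by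
  cases ks with
  | nil => rfl
  | cons c t =>
    cases c
    · rw [List.dropWhile_cons]; simp [pvRuns]
    · rw [List.dropWhile_cons]; simp

theorem pvRuns_false_cons (t : List Bool) : pvRuns (false :: t) = pvRuns t := by
  rw [pvRuns]
  simpa using pvRuns_dropWhile_false t

theorem pvRuns_true_cons (t : List Bool) :
    pvRuns (true :: t) = 1 + pvRuns (t.dropWhile (· == true)) := by
  rw [pvRuns]; simp

theorem pvPos_false_cons (t : List Bool) : pvPos (false :: t) = (pvPos t).map (· + 1) := by
  simp [pvPos]

theorem pvPos_true_cons (t : List Bool) : pvPos (true :: t) = 0 :: (pvPos t).map (· + 1) := by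
  simp [pvPos]

-- runs = 0 iff there is no true entry
theorem pvRuns_eq_zero (ks : List Bool) : pvRuns ks = 0 ↔ pvPos ks = [] := by
  induction ks with
  | nil => simp [pvRuns, pvPos]
  | cons b t ih =>
    cases b
    · rw [pvRuns_false_cons, pvPos_false_cons, ih]
      simp
    · rw [pvRuns_true_cons, pvPos_true_cons]
      simp

-- getLastD through a map, for a nonempty list (any defaults)
theorem pvLastD_map {α β : Type} (f : α → β) (l : List α) (d : β) (d' : α) (hl : l ≠ []) :
    (l.map f).getLastD d = f (l.getLastD d') := by
  rw [List.getLastD_eq_getLast?, List.getLastD_eq_getLast?, List.getLast?_map]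
  rw [List.getLast?_eq_some_getLast hl]
  simp

-- positions are bounded: list length ≤ last index + 1
theorem pvPos_len_le (ks : List Bool) : (pvPos ks).length ≤ (pvPos ks).getLastD 0 + 1 := by
  induction ks with
  | nil => simp [pvPos]
  | cons b t ih =>
    cases b
    · rw [pvPos_false_cons]
      cases hp : pvPos t with
      | nil => simp
      | cons q qs =>
        rw [hp] at ih
        rw [pvLastD_map _ _ _ 0 (by simp), List.length_map]
        omega
    · rw [pvPos_true_cons]
      cases hp : pvPos t with
      | nil => simp
      | cons q qs =>
        rw [hp] at ih
        have h2 : ((q :: qs).map (· + 1)).getLastD 0 = (q :: qs).getLastD 0 + 1 :=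
          pvLastD_map _ _ _ 0 (by simp)
        have h3 : (0 :: (q :: qs).map (· + 1)).getLastD 0
            = ((q :: qs).map (· + 1)).getLastD 0 := by
          rw [show (q :: qs).map (· + 1) = (q + 1) :: qs.map (· + 1) by simp]
          rw [List.getLastD_eq_getLast?, List.getLastD_eq_getLast?, List.getLast?_cons_cons]
        rw [h3, h2]
        simp only [List.length_cons, List.length_map] at *
        omega

-- the contiguity condition B tests, as a proposition on the key list
def pvOneBlock (ks : List Bool) : Prop :=
  pvPos ks ≠ [] ∧
    (pvPos ks).getLastD 0 + 1 = (pvPos ks).headD 0 + (pvPos ks).length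

-- shifting all positions by +1 (a leading consonant) does not change the condition
theorem pvOneBlock_false_cons (t : List Bool) : pvOneBlock (false :: t) ↔ pvOneBlock t := by
  unfold pvOneBlock
  rw [pvPos_false_cons]
  cases hp : pvPos t with
  | nil => simp
  | cons q qs =>
    rw [pvLastD_map _ _ _ 0 (by simp)]
    simp only [List.map_cons, List.headD_cons, List.length_cons, List.length_map,
      ne_eq, List.cons_ne_nil, not_false_eq_true, true_and]
    omega

-- KEY: A's run count is 1 exactly when the true positions form one contiguous block
theorem pvKey (ks : List Bool) : pvRuns ks = 1 ↔ pvOneBlock ks := by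
  induction ks with
  | nil => simp [pvRuns, pvOneBlock, pvPos]
  | cons b t ih =>
    cases b
    · rw [pvRuns_false_cons, pvOneBlock_false_cons]
      exact ih
    · cases t with
      | nil =>
        simp [pvRuns, pvOneBlock, pvPos, List.dropWhile]
      | cons b' t' =>
        cases b'
        · -- true :: false :: t'
          have hruns : pvRuns (true :: false :: t') = 1 + pvRuns t' := by
            rw [pvRuns_true_cons, List.dropWhile_cons]
            simp [pvRuns_false_cons]
          rw [hruns]
          unfold pvOneBlock
          rw [pvPos_true_cons, pvPos_false_cons]
          cases hp : pvPos t' with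
          | nil =>
            have h0 : pvRuns t' = 0 := (pvRuns_eq_zero t').mpr hp
            simp [h0]
          | cons q qs =>
            have hne : pvRuns t' ≠ 0 := by
              rw [ne_eq, pvRuns_eq_zero, hp]
              simp
            have hle := pvPos_len_le t'
            rw [hp] at hle
            have h2 : ((q :: qs).map (· + 1)).getLastD 0 = (q :: qs).getLastD 0 + 1 :=
              pvLastD_map _ _ _ 0 (by simp)
            have h2' : (((q :: qs).map (· + 1)).map (· + 1)).getLastD 0
                = (q :: qs).getLastD 0 + 2 := by
              rw [pvLastD_map _ _ _ 0 (by simp), h2]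
            have h3 : (0 :: ((q :: qs).map (· + 1)).map (· + 1)).getLastD 0
                = (q :: qs).getLastD 0 + 2 := by
              rw [List.getLastD_eq_getLast?, ← h2', List.getLastD_eq_getLast?]
              rw [show (((q :: qs).map (· + 1)).map (· + 1))
                  = (q + 1 + 1) :: ((qs.map (· + 1)).map (· + 1)) by simp]
              rw [List.getLast?_cons_cons]
            rw [h3]
            simp only [List.length_cons, List.length_map, List.headD_cons,
              List.map_cons, ne_eq, List.cons_ne_nil, not_false_eq_true, true_and]
            simp only [List.length_cons] at hle
            constructor
            · intro h; omega
            · intro h; omega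
        · -- true :: true :: t'
          have hruns : pvRuns (true :: true :: t') = pvRuns (true :: t') := by
            rw [pvRuns_true_cons, pvRuns_true_cons, List.dropWhile_cons]
            simp
          rw [hruns, ih]
          unfold pvOneBlock
          rw [pvPos_true_cons (true :: t'), pvPos_true_cons t']
          cases hp : pvPos t' with
          | nil =>
            simp [List.getLastD_eq_getLast?, List.getLast?_cons_cons]
          | cons q qs =>
            have h2 : ((q :: qs).map (· + 1)).getLastD 0 = (q :: qs).getLastD 0 + 1 :=
              pvLastD_map _ _ _ 0 (by simp)
            have hL1 : (0 :: (q :: qs).map (· + 1)).getLastD 0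
                = (q :: qs).getLastD 0 + 1 := by
              rw [List.getLastD_eq_getLast?, ← h2, List.getLastD_eq_getLast?]
              rw [show ((q :: qs).map (· + 1)) = (q + 1) :: qs.map (· + 1) by simp]
              rw [List.getLast?_cons_cons]
            have h2' : ((0 :: (q :: qs).map (· + 1)).map (· + 1)).getLastD 0
                = (q :: qs).getLastD 0 + 2 := by
              rw [pvLastD_map _ _ _ 0 (by simp), hL1]
            have hL2 : (0 :: (0 :: (q :: qs).map (· + 1)).map (· + 1)).getLastD 0
                = (q :: qs).getLastD 0 + 2 := by
              rw [List.getLastD_eq_getLast?, ← h2', List.getLastD_eq_getLast?]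
              rw [show ((0 :: (q :: qs).map (· + 1)).map (· + 1))
                  = 1 :: ((q :: qs).map (· + 1)).map (· + 1) by simp]
              rw [List.getLast?_cons_cons]
            rw [hL1, hL2]
            simp only [List.length_cons, List.length_map, List.headD_cons,
              ne_eq, List.cons_ne_nil, not_false_eq_true, true_and]
            omega

-- A's foldl over characters counts the vowel runs of the key list
theorem pvFoldA_eq (l : List Char) :
    (List.foldl pvStepA (0, false) l).1 = (pvRuns (l.map (pvVowels.contains ·)) : Int) := by
  have h1 : List.foldl pvStepA (0, false) l
      = List.foldl pvStepB (0, false) (l.map (pvVowels.contains ·)) := by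
    rw [List.foldl_map]
    rfl
  rw [h1, pvFold_stepB_eq, pvRuns_dropWhile_false]
  simp

theorem pvVowelsB_eq : pvVowelsB = pvVowels := rfl

-- B's positions list is the coerced pvPos of the key list
theorem pvPositions_gen (l : List Char) : ∀ (s : Int),
    ((PySem.List.enumerate l s).filter (fun p => pvVowels.contains p.2)).map (fun p => p.1)
      = (pvPos (l.map (pvVowels.contains ·))).map (fun n : Nat => s + n) := by
  induction l with
  | nil => intro s; simp [PySem.List.enumerate_nil, pvPos]
  | cons c t ih =>
    intro s
    rw [PySem.List.enumerate_cons, List.filter_cons]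
    by_cases hc : pvVowels.contains c
    · rw [if_pos (by simpa using hc)]
      simp only [List.map_cons, hc, pvPos_true_cons, ih]
      congr 1
      · simp
      · rw [List.map_map]
        apply List.map_congr_left
        intro x _
        simp only [Function.comp_apply]
        push_cast
        ring
    · rw [if_neg (by simpa using hc)]
      have hc' : pvVowels.contains c = false := by simpa using hc
      simp only [List.map_cons, hc', pvPos_false_cons, ih]
      rw [List.map_map]
      apply List.map_congr_left
      intro x _
      simp only [Function.comp_apply]
      push_cast
      ring

theorem pvPositions_eq (l : List Char) :
    pvPositions l = (pvPos (l.map (pvVowels.contains ·))).map (fun n : Nat => (n : Int)) := by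
  unfold pvPositions
  rw [pvVowelsB_eq, pvPositions_gen l 0]
  simp

theorem needs_doubling_eq (base : String) :
    needs_doubling_py base = needs_doubling_py_alt base := by
  unfold needs_doubling_py needs_doubling_py_alt
  rw [pvVowelsB_eq]
  by_cases hlen : PySem.Str.len base < 3
  · rw [if_pos hlen, if_pos hlen]
  · rw [if_neg hlen, if_neg hlen, pvFoldA_eq]
    simp only [pvPositions_eq]
    have hkey := pvKey (base.toList.map (pvVowels.contains ·))
    cases hp : pvPos (base.toList.map (pvVowels.contains ·)) with
    | nil =>
      have h0 : pvRuns (base.toList.map (pvVowels.contains ·)) = 0 :=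
        (pvRuns_eq_zero _).mpr hp
      rw [h0, if_pos (by norm_num)]
      simp
    | cons p0 ps =>
      unfold pvOneBlock at hkey
      rw [hp] at hkey
      simp only [List.map_cons, List.isEmpty_cons, List.headD_cons, Bool.false_eq_true,
        if_false]
      have hgl2 : ((p0 : Int) :: ps.map (fun n : Nat => (n : Int))).getLastD 0
          = (((p0 :: ps).getLastD 0 : Nat) : Int) := by
        rw [show ((p0 : Int) :: ps.map (fun n : Nat => (n : Int)))
            = (p0 :: ps).map (fun n : Nat => (n : Int)) by simp]
        exact pvLastD_map _ _ _ 0 (by simp)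
      by_cases hcond : (p0 :: ps).getLastD 0 + 1 = p0 + (p0 :: ps).length
      · have hr : pvRuns (base.toList.map (pvVowels.contains ·)) = 1 :=
          hkey.mpr ⟨by simp, by simpa using hcond⟩
        have hBcond : ((p0 : Int) :: ps.map (fun n : Nat => (n : Int))).getLastD 0
            - (p0 : Int) + 1 = (((p0 : Int) :: ps.map (fun n : Nat => (n : Int))).length : Int) := by
          rw [hgl2]
          simp only [List.length_cons, List.length_map] at *
          push_cast
          omega
        rw [hr, if_neg (by simp), if_neg (by intro h; exact h hBcond)]
        cases PySem.Str.pyGet? base (-1) <;> cases PySem.Str.pyGet? base (-2) <;>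
          cases PySem.Str.pyGet? base (-3) <;> rfl
      · have hr : pvRuns (base.toList.map (pvVowels.contains ·)) ≠ 1 := by
          intro h
          exact hcond (by simpa using (hkey.mp h).2)
        have hBcond : ((p0 : Int) :: ps.map (fun n : Nat => (n : Int))).getLastD 0
            - (p0 : Int) + 1 ≠ (((p0 : Int) :: ps.map (fun n : Nat => (n : Int))).length : Int) := by
          rw [hgl2]
          simp only [List.length_cons, List.length_map] at *
          push_cast
          omega
        rw [if_pos (by intro h; apply hr; exact_mod_cast h), if_pos hBcond]

-- ===== VERDICT (by name: the statement is the Claim_ definition above) =====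
theorem needs_doubling_py_spec : Claim_equal_needs_doubling_py := by
  intro base _
  unfold Spec_needs_doubling_py
  exact needs_doubling_eq base
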